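-- pv_equiv track=rewrite | github.com/ertanuysal/NeuralNetwork_PersonOrNot | preprocess.py | create_samples
-- ===== SOURCE A (Python) =====
-- def create_samples(words, labels):
-- 	started = False
-- 	sentences = []
-- 	sentence = []
-- 	size = len(words)
--
-- 	for i in range(len(words)):
-- 		sample = []
--
-- 		if words[i]==".":
-- 			sentences.append(sentence)
-- 			sentence = []
-- 		else:
-- 			#add (n-1)th word
-- 			if i == 0 or words[i-1] == ".":
-- 				sample.append("¡s¿")
-- 			else:
-- 				sample.append(words[i-1])
--
-- 			#add middle word
-- 			sample.append(words[i])
--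
-- 			#add (n+1)th word
-- 			if i == size-1 or words[i+1] == ".":
-- 				sample.append("¡/s¿")
-- 			else:
-- 				sample.append(words[i+1])
--
-- 			#add label
-- 			sample.append(labels[i])
--
-- 			sentence.append(sample)
--
-- 	sentences.append(sentence)#last sentence does not have a "."
-- 	return sentences
-- ===== SOURCE B (Python) =====
-- def create_samples(words, labels):
--     # Phase 1: split words into sentence groups on ".", keeping each word's original index.
--     groups = []
--     cur = []
--     for i, w in enumerate(words):
--         if w == ".":
--             groups.append(cur)
--             cur = []
--         else:
--             cur.append((i, w))
--     groups.append(cur)  # final sentence may lack a trailing "."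
--
--     # Phase 2: render each group using in-group neighbours and boundary markers.
--     sentences = []
--     for g in groups:
--         n = len(g)
--         sent = []
--         for k in range(n):
--             i, w = g[k]
--             prev = "¡s¿" if k == 0 else g[k - 1][1]
--             nxt = "¡/s¿" if k == n - 1 else g[k + 1][1]
--             sent.append([prev, w, nxt, labels[i]])
--         sentences.append(sent)
--     return sentences
-- ===== Notes on version B (the rewrite author's own statement) =====
-- stated objective: alternative
-- what changed: B replaces A's single stateful pass (which decides each sample's boundary markers with global lookbehind/lookahead while accumulating it) by a two-phase decomposition: first split the words into sentence groups on '.' keeping each word's original index, then render every group's samples from in-group neighbours and the group's own boundaries.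
import Mathlib
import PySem

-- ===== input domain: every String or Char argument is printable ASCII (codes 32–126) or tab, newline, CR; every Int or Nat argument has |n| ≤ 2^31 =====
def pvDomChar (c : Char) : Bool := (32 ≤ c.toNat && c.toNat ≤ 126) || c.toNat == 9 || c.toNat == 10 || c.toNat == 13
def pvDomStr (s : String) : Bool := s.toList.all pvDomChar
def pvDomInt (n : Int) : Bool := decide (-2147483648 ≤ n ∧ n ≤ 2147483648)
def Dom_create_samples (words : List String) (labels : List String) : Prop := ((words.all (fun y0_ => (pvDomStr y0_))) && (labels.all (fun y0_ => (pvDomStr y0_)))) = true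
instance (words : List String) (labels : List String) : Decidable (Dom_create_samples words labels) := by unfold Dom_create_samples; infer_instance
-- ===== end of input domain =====

-- B replaces A's one stateful pass (which bakes global lookahead/lookbehind into each sample as it
-- goes) by two phases: split the words into indexed sentence groups on ".", then render each group
-- from its in-group neighbours; objective: alternative decomposition, same cost.

-- ===== PORT A =====
-- loop body of A's single for-loop; state = (sentences, sentence).
-- labels[i] raises IndexError when i ≥ len(labels): those inputs are excluded by Pre_ below,
-- so the total getD stands in for labels[i] only on indices where it equals it.
def stepA (words labels : List String) (size : Nat)
    (st : List (List (List String)) × List (List String)) (i : Nat) :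
    List (List (List String)) × List (List String) :=
  if words.getD i "" = "." then
    (st.1 ++ [st.2], [])
  else
    let p := if i = 0 ∨ words.getD (i - 1) "" = "." then "¡s¿" else words.getD (i - 1) ""
    let nx := if i = size - 1 ∨ words.getD (i + 1) "" = "." then "¡/s¿" else words.getD (i + 1) ""
    let sample := [p, words.getD i "", nx, labels.getD i ""]
    (st.1, st.2 ++ [sample])

def create_samples (words : List String) (labels : List String) : List (List (List String)) :=
  let size := words.length
  let st := (List.range words.length).foldl (stepA words labels size) ([], [])
  st.1 ++ [st.2]  -- last sentence does not have a "."

-- ===== PORT B =====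
-- Phase-1 loop body: split into indexed groups on "."; state = (groups, cur).
def stepB (st : List (List (Nat × String)) × List (Nat × String)) (wi : String × Nat) :
    List (List (Nat × String)) × List (Nat × String) :=
  if wi.1 = "." then (st.1 ++ [st.2], []) else (st.1, st.2 ++ [(wi.2, wi.1)])

-- Phase-2: render one group from in-group neighbours (labels[i] as in A: Pre_ keeps it in range).
def renderGroup (labels : List String) (g : List (Nat × String)) : List (List String) :=
  (List.range g.length).map (fun k =>
    let iw := g.getD k (0, "")
    [if k = 0 then "¡s¿" else (g.getD (k - 1) (0, "")).2,
     iw.2,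
     if k = g.length - 1 then "¡/s¿" else (g.getD (k + 1) (0, "")).2,
     labels.getD iw.1 ""])

def create_samples_alt (words : List String) (labels : List String) : List (List (List String)) :=
  let st := words.zipIdx.foldl stepB ([], [])   -- zipIdx = enumerate (nonnegative indices)
  (st.1 ++ [st.2]).map (renderGroup labels)

-- ===== PRECONDITION & SPEC =====
-- Pre_ excludes exactly the inputs where Python A raises IndexError: some non-"." index has no label.
def Pre_create_samples (words : List String) (labels : List String) : Prop :=
  ∀ i ∈ List.range words.length, words.getD i "" ≠ "." → i < labels.length
instance (words : List String) (labels : List String) : Decidable (Pre_create_samples words labels) := by unfold Pre_create_samples; infer_instance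

def pvWitness_create_samples : List String × List String := (["he", "runs", ".", "ok"], ["P", "N", "X", "P"])

def Spec_create_samples (words : List String) (labels : List String) (out : List (List (List String))) : Prop := out = create_samples_alt words labels
instance (words : List String) (labels : List String) (out : List (List (List String))) : Decidable (Spec_create_samples words labels out) := by unfold Spec_create_samples; infer_instance

-- ===== CLAIM (what is proved, stated in full; the proofs are below) =====
def Claim_equal_create_samples : Prop := ∀ (words : List String) (labels : List String), Dom_create_samples words labels → Pre_create_samples words labels → Spec_create_samples words labels (create_samples words labels)

-- ===== LEMMAS AND PROOFS =====

-- A's sample at index i, as the closed form stepA computes in its else-branch.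
def sampleA (words labels : List String) (i : Nat) : List String :=
  [if i = 0 ∨ words.getD (i - 1) "" = "." then "¡s¿" else words.getD (i - 1) "",
   words.getD i "",
   if i = words.length - 1 ∨ words.getD (i + 1) "" = "." then "¡/s¿" else words.getD (i + 1) "",
   labels.getD i ""]

-- the in-progress states of the two loops over indices [start, j)
def sampA (words labels : List String) (start j : Nat) : List (List String) :=
  (List.range' start (j - start)).map (sampleA words labels)

def pairsW (words : List String) (start j : Nat) : List (Nat × String) :=
  (List.range' start (j - start)).map (fun i => (i, words.getD i ""))

lemma zipIdx_eq_range_map (words : List String) :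
    ∀ j : Nat, words.zipIdx j = (List.range' j words.length).map (fun i => (words.getD (i - j) "", i)) := by
  induction words with
  | nil => intro j; simp
  | cons w ws ih =>
    intro j
    simp only [List.zipIdx_cons, List.length_cons, List.range'_succ, List.map_cons]
    refine List.cons_eq_cons.mpr ⟨by simp, ?_⟩
    rw [ih (j + 1)]
    apply List.map_congr_left
    intro i hi
    have h0 : j + 1 ≤ i := (List.mem_range'_1.mp hi).1
    have h1 : i - j = (i - (j + 1)) + 1 := by omega
    simp [h1]

lemma zipIdx_eq0 (words : List String) :
    words.zipIdx = (List.range' 0 words.length).map (fun i => (words.getD i "", i)) := by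
  rw [zipIdx_eq_range_map words 0]
  apply List.map_congr_left
  intro i _
  rw [Nat.sub_zero]

lemma crux (words labels : List String) (start len : Nat)
    (hb : start = 0 ∨ words.getD (start - 1) "" = ".")
    (hnd : ∀ i, start ≤ i → i < start + len → words.getD i "" ≠ ".")
    (he : start + len = words.length ∨ words.getD (start + len) "" = ".")
    (hlen : start + len ≤ words.length) :
    (List.range' start len).map (sampleA words labels)
      = renderGroup labels ((List.range' start len).map (fun i => (i, words.getD i ""))) := by
  set G := (List.range' start len).map (fun i => (i, words.getD i "")) with hGdef
  have hGlen : G.length = len := by simp [hGdef]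
  have hG : ∀ m, m < len → G.getD m (0, "") = (start + m, words.getD (start + m) "") := by
    intro m hm
    rw [hGdef, List.getD_eq_getElem _ _ (by simp [hm])]
    simp
  apply List.ext_getElem
  · simp [renderGroup, hGlen]
  intro k hk1 hk2
  simp only [List.length_map, List.length_range'] at hk1
  unfold renderGroup
  simp only [List.getElem_map, List.getElem_range', List.getElem_range, one_mul, hGlen,
    hG k hk1]
  have hprev : (if k = 0 then "¡s¿" else (G.getD (k - 1) (0, "")).2)
      = if start + k = 0 ∨ words.getD (start + k - 1) "" = "." then "¡s¿"
        else words.getD (start + k - 1) "" := by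
    by_cases hk0 : k = 0
    · subst hk0
      rcases hb with h | h
      · simp [h]
      · rw [if_pos (Or.inr (by simpa using h))]
        simp
    · rw [if_neg hk0, hG (k - 1) (by omega)]
      rw [if_neg (by
        push_neg
        refine ⟨by omega, ?_⟩
        have := hnd (start + (k - 1)) (by omega) (by omega)
        simpa [show start + k - 1 = start + (k - 1) by omega] using this)]
      simp [show start + (k - 1) = start + k - 1 by omega]
  have hnxt : (if k = len - 1 then "¡/s¿" else (G.getD (k + 1) (0, "")).2)
      = if start + k = words.length - 1 ∨ words.getD (start + k + 1) "" = "." then "¡/s¿"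
        else words.getD (start + k + 1) "" := by
    by_cases hkl : k = len - 1
    · rw [if_pos hkl]
      rcases he with h | h
      · rw [if_pos (Or.inl (by omega))]
      · rw [if_pos (Or.inr (by simpa [show start + k + 1 = start + len by omega] using h))]
    · rw [if_neg hkl, hG (k + 1) (by omega)]
      rw [if_neg (by
        push_neg
        exact ⟨by omega, hnd (start + k + 1) (by omega) (by omega)⟩)]
      simp [show start + (k + 1) = start + k + 1 by omega]
  unfold sampleA
  rw [hprev, hnxt]

lemma master (words labels : List String) :
    ∀ (m j start : Nat) (SA : List (List (List String))) (SB : List (List (Nat × String))),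
    j + m = words.length → start ≤ j →
    (start = 0 ∨ words.getD (start - 1) "" = ".") →
    (∀ i, start ≤ i → i < j → words.getD i "" ≠ ".") →
    SA = SB.map (renderGroup labels) →
    (let r := (List.range' j m).foldl (stepA words labels words.length) (SA, sampA words labels start j);
      r.1 ++ [r.2])
    = (let r := (List.range' j m).foldl
          (fun st i => stepB st (words.getD i "", i)) (SB, pairsW words start j);
       (r.1 ++ [r.2]).map (renderGroup labels)) := by
  intro m
  induction m with
  | zero =>
    intro j start SA SB hjm hsj hb hnd hS
    simp only [List.range'_zero, List.foldl_nil, List.map_append, List.map_cons, List.map_nil]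
    rw [hS]
    congr 2
    unfold sampA pairsW
    apply crux words labels start (j - start)
    · exact hb
    · intro i h1 h2; exact hnd i h1 (by omega)
    · left; omega
    · omega
  | succ m ih =>
    intro j start SA SB hjm hsj hb hnd hS
    rw [List.range'_succ]
    simp only [List.foldl_cons]
    by_cases hdot : words.getD j "" = "."
    · have eA : stepA words labels words.length (SA, sampA words labels start j) j
          = (SA ++ [sampA words labels start j], []) := by
        unfold stepA; rw [if_pos hdot]
      have eB : stepB (SB, pairsW words start j) (words.getD j "", j)
          = (SB ++ [pairsW words start j], []) := by
        unfold stepB; simp only [if_pos hdot]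
      rw [eA, eB]
      have hA' : SA ++ [sampA words labels start j]
          = (SB ++ [pairsW words start j]).map (renderGroup labels) := by
        rw [List.map_append, hS]
        congr 1
        simp only [List.map_cons, List.map_nil]
        congr 1
        unfold sampA pairsW
        apply crux words labels start (j - start)
        · exact hb
        · intro i h1 h2; exact hnd i h1 (by omega)
        · right
          have e : start + (j - start) = j := by omega
          rw [e]; exact hdot
        · omega
      have e1 : ([] : List (List String)) = sampA words labels (j + 1) (j + 1) := by
        unfold sampA; simp
      have e2 : ([] : List (Nat × String)) = pairsW words (j + 1) (j + 1) := by
        unfold pairsW; simp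
      rw [e1, e2]
      exact ih (j + 1) (j + 1) _ _ (by omega) (le_refl _)
        (Or.inr (by simpa using hdot)) (by intro i h1 h2; omega) hA'
    · have eA : stepA words labels words.length (SA, sampA words labels start j) j
          = (SA, sampA words labels start (j + 1)) := by
        unfold stepA
        rw [if_neg hdot]
        simp only
        congr 1
        unfold sampA sampleA
        have e : j + 1 - start = (j - start) + 1 := by omega
        rw [e, List.range'_1_concat, List.map_append]
        have e2 : start + (j - start) = j := by omega
        simp [e2]
      have eB : stepB (SB, pairsW words start j) (words.getD j "", j)
          = (SB, pairsW words start (j + 1)) := by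
        unfold stepB
        simp only [if_neg hdot]
        congr 1
        unfold pairsW
        have e : j + 1 - start = (j - start) + 1 := by omega
        rw [e, List.range'_1_concat, List.map_append]
        have e2 : start + (j - start) = j := by omega
        simp [e2]
      rw [eA, eB]
      exact ih (j + 1) start _ _ (by omega) (by omega) hb
        (by intro i h1 h2
            by_cases hij : i = j
            · subst hij; exact hdot
            · exact hnd i h1 (by omega)) hS

-- ===== VERDICT (by name: the statement is the Claim_ definition above) =====
theorem create_samples_spec : Claim_equal_create_samples := by
  intro words labels _ _
  unfold Spec_create_samples create_samples create_samples_alt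
  have hz : words.zipIdx.foldl stepB ([], [])
      = (List.range' 0 words.length).foldl
          (fun st i => stepB st (words.getD i "", i)) ([], []) := by
    rw [zipIdx_eq0, List.foldl_map]
  simp only [hz, List.range_eq_range']
  exact master words labels words.length 0 0 [] [] (by omega) (le_refl 0) (Or.inl rfl)
    (fun i h1 h2 => absurd h2 (by omega)) (by simp)
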